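-- pv_equiv track=rewrite | github.com/snyke7/aoc2023 | day23.py | path_to_str
-- ===== SOURCE A (Python) =====
-- def path_to_str(the_path):
--     x_min = min((x for x, _ in the_path))
--     x_max = max((x for x, _ in the_path))
--     y_min = min((y for _, y in the_path))
--     y_max = max((y for _, y in the_path))
--     return '\n'.join((
--         ''.join((
--             'O' if (x, y) in the_path else ' '
--             for y in range(y_min, y_max + 1)
--         ))
--         for x in range(x_min, x_max + 1)
--     ))
-- ===== SOURCE B (Python) =====
-- def path_to_str(the_path):
--     x_min = min((x for x, _ in the_path))
--     x_max = max((x for x, _ in the_path))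
--     y_min = min((y for _, y in the_path))
--     y_max = max((y for _, y in the_path))
--     grid = [[' '] * (y_max - y_min + 1) for _ in range(x_max - x_min + 1)]
--     for x, y in the_path:
--         grid[x - x_min][y - y_min] = 'O'
--     return '\n'.join(''.join(row) for row in grid)
-- ===== Notes on version B (the rewrite author's own statement) =====
-- stated objective: faster
-- what changed: Instead of testing '(x, y) in the_path' for every cell of the bounding box (a linear scan per cell), B allocates a grid of spaces and scatters the points into it in one pass, then joins the rows.
import Mathlib
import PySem

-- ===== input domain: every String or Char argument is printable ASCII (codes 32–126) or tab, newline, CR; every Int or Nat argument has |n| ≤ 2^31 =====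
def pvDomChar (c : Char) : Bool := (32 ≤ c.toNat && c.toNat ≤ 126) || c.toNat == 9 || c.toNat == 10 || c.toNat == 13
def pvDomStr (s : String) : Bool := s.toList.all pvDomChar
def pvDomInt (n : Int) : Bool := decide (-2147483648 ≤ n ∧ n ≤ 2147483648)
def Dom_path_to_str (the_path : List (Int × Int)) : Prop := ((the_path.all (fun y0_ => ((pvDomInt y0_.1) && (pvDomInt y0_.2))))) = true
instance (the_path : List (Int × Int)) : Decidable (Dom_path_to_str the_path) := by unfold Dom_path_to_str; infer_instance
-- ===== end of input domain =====

-- B replaces A's per-cell membership scan with one scatter pass into a preallocated grid (faster).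
-- Both Pythons raise ValueError on the empty path (min of an empty sequence); Pre_ excludes it.

-- ===== PORT A =====
def path_to_str (the_path : List (Int × Int)) : String :=
  match PySem.List.min? (the_path.map Prod.fst) (fun v => v),
        PySem.List.max? (the_path.map Prod.fst) (fun v => v),
        PySem.List.min? (the_path.map Prod.snd) (fun v => v),
        PySem.List.max? (the_path.map Prod.snd) (fun v => v) with
  | some x_min, some x_max, some y_min, some y_max =>
      String.intercalate "\n" ((PySem.List.pyRange x_min (x_max + 1) 1).map (fun x =>
        String.mk ((PySem.List.pyRange y_min (y_max + 1) 1).map (fun y =>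
          if (x, y) ∈ the_path then 'O' else ' '))))
  | _, _, _, _ => ""    -- Python raises ValueError here (empty path); excluded by Pre_

-- ===== PORT B =====
def pvScatter (x_min y_min : Int) (the_path : List (Int × Int)) (g : List (List Char)) :
    List (List Char) :=
  the_path.foldl (fun g p =>
    g.modify (p.1 - x_min).toNat (fun row => row.set (p.2 - y_min).toNat 'O')) g

def path_to_str_alt (the_path : List (Int × Int)) : String :=
  -- Python raises ValueError on the empty path (min of empty); any `none` case is excluded by Pre_
  match PySem.List.min? (the_path.map Prod.fst) (fun v => v) with
  | none => ""
  | some x_min =>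
  match PySem.List.max? (the_path.map Prod.fst) (fun v => v) with
  | none => ""
  | some x_max =>
  match PySem.List.min? (the_path.map Prod.snd) (fun v => v) with
  | none => ""
  | some y_min =>
  match PySem.List.max? (the_path.map Prod.snd) (fun v => v) with
  | none => ""
  | some y_max =>
    let grid : List (List Char) :=
      List.replicate (x_max - x_min + 1).toNat
        (List.replicate (y_max - y_min + 1).toNat ' ')
    String.intercalate "\n" ((pvScatter x_min y_min the_path grid).map String.mk)

-- ===== PRECONDITION & SPEC =====
-- A (and B) raise ValueError on the empty path: min() of an empty sequence.
def Pre_path_to_str (the_path : List (Int × Int)) : Prop := the_path ≠ []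
instance (the_path : List (Int × Int)) : Decidable (Pre_path_to_str the_path) := by
  unfold Pre_path_to_str; infer_instance
def pvWitness_path_to_str : (List (Int × Int)) := [((1 : Int), (2 : Int)), (0, 2)]

def Spec_path_to_str (the_path : List (Int × Int)) (out : String) : Prop :=
  out = path_to_str_alt the_path
instance (the_path : List (Int × Int)) (out : String) : Decidable (Spec_path_to_str the_path out) := by
  unfold Spec_path_to_str; infer_instance

-- ===== CLAIM (what is proved, stated in full; the proofs are below) =====
def Claim_equal_path_to_str : Prop := ∀ (the_path : List (Int × Int)), Dom_path_to_str the_path → Pre_path_to_str the_path → Spec_path_to_str the_path (path_to_str the_path)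

-- ===== LEMMAS AND PROOFS =====

theorem pvScatter_length (x_min y_min : Int) (pts : List (Int × Int)) (g : List (List Char)) :
    (pvScatter x_min y_min pts g).length = g.length := by
  induction pts generalizing g with
  | nil => rfl
  | cons p t ih =>
      simp only [pvScatter, List.foldl_cons]
      have h := ih (g.modify (p.1 - x_min).toNat (fun row => row.set (p.2 - y_min).toNat 'O'))
      simp only [pvScatter] at h
      rw [h, List.length_modify]

theorem pvScatter_cell (x_min y_min : Int) (pts : List (Int × Int)) (g : List (List Char))
    (i j : Nat) :
    ((pvScatter x_min y_min pts g)[i]?.getD [])[j]? =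
      if pts.any (fun p => (p.1 - x_min).toNat == i && (p.2 - y_min).toNat == j)
        ∧ j < (g[i]?.getD []).length then some 'O'
      else (g[i]?.getD [])[j]? := by
  induction pts generalizing g with
  | nil =>
      rw [if_neg (by simp)]
      rfl
  | cons p t ih =>
      simp only [pvScatter, List.foldl_cons] at ih ⊢
      rw [ih]
      by_cases hi : i < g.length
      · have hmod : (g.modify (p.1 - x_min).toNat
            (fun row => row.set (p.2 - y_min).toNat 'O'))[i]?.getD []
            = if (p.1 - x_min).toNat = i
                then (g[i]'hi).set (p.2 - y_min).toNat 'O' else g[i]'hi := by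
          rw [List.getElem?_eq_getElem (by simpa [List.length_modify] using hi)]
          simp [List.getElem_modify]
        have hgi : g[i]?.getD [] = g[i]'hi := by simp [List.getElem?_eq_getElem hi]
        rw [hmod, hgi]
        by_cases hx : (p.1 - x_min).toNat = i
        · rw [if_pos hx]
          rw [show ((g[i]'hi).set (p.2 - y_min).toNat 'O').length = (g[i]'hi).length from by simp]
          by_cases hy : (p.2 - y_min).toNat = j
          · by_cases hjl : j < (g[i]'hi).length
            · have hset : ((g[i]'hi).set (p.2 - y_min).toNat 'O')[j]? = some 'O' := by
                rw [hy, List.getElem?_set_eq_of_lt _ hjl]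
              have hpos : ((p :: t).any
                  (fun p => (p.1 - x_min).toNat == i && (p.2 - y_min).toNat == j)) = true := by
                simp only [List.any_cons, Bool.or_eq_true]
                exact Or.inl (by simp [hx, hy])
              split
              · rw [if_pos ⟨hpos, hjl⟩]
              · rw [hset, if_pos ⟨hpos, hjl⟩]
            · rw [if_neg (by rintro ⟨-, hc⟩; exact hjl hc),
                  if_neg (by rintro ⟨-, hc⟩; exact hjl hc),
                  List.getElem?_eq_none (by simpa [List.length_set] using Nat.le_of_not_lt hjl),
                  List.getElem?_eq_none (by simpa using Nat.le_of_not_lt hjl)]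
          · have hset : ((g[i]'hi).set (p.2 - y_min).toNat 'O')[j]? = (g[i]'hi)[j]? :=
              List.getElem?_set_ne hy
            rw [hset]
            have hcond : ((p :: t).any
                (fun p => (p.1 - x_min).toNat == i && (p.2 - y_min).toNat == j))
                = (t.any (fun p => (p.1 - x_min).toNat == i && (p.2 - y_min).toNat == j)) := by
              simp [List.any_cons, hy]
            rw [hcond]
        · rw [if_neg hx]
          have hcond : ((p :: t).any
              (fun p => (p.1 - x_min).toNat == i && (p.2 - y_min).toNat == j))
              = (t.any (fun p => (p.1 - x_min).toNat == i && (p.2 - y_min).toNat == j)) := by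
            simp [List.any_cons, hx]
          rw [hcond]
      · have h1 : (g.modify (p.1 - x_min).toNat
            (fun row => row.set (p.2 - y_min).toNat 'O'))[i]? = none := by
          rw [List.getElem?_eq_none]
          simpa [List.length_modify] using Nat.le_of_not_lt hi
        have h2 : g[i]? = none := by
          rw [List.getElem?_eq_none]
          exact Nat.le_of_not_lt hi
        rw [h1, h2]
        rw [if_neg (by simp), if_neg (by simp)]

theorem pvScatter_grid_eq (the_path : List (Int × Int)) (x_min x_max y_min y_max : Int)
    (hxm : PySem.List.min? (the_path.map Prod.fst) (fun v => v) = some x_min)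
    (hxM : PySem.List.max? (the_path.map Prod.fst) (fun v => v) = some x_max)
    (hym : PySem.List.min? (the_path.map Prod.snd) (fun v => v) = some y_min)
    (hyM : PySem.List.max? (the_path.map Prod.snd) (fun v => v) = some y_max) :
    pvScatter x_min y_min the_path
      (List.replicate (x_max - x_min + 1).toNat (List.replicate (y_max - y_min + 1).toNat ' ')) =
    (PySem.List.pyRange x_min (x_max + 1) 1).map (fun x =>
      (PySem.List.pyRange y_min (y_max + 1) 1).map (fun y =>
        if (x, y) ∈ the_path then 'O' else ' ')) := by
  have bnd : ∀ p ∈ the_path, x_min ≤ p.1 ∧ p.1 ≤ x_max ∧ y_min ≤ p.2 ∧ p.2 ≤ y_max := by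
    intro p hp
    exact ⟨PySem.List.min?_isMin hxm _ (List.mem_map_of_mem hp),
           PySem.List.max?_isMax hxM _ (List.mem_map_of_mem hp),
           PySem.List.min?_isMin hym _ (List.mem_map_of_mem hp),
           PySem.List.max?_isMax hyM _ (List.mem_map_of_mem hp)⟩
  apply List.ext_getElem
  · simp only [pvScatter_length, List.length_replicate, List.length_map,
      PySem.List.length_pyRange_one]
    omega
  intro i h1 h2
  have hiW : i < (x_max - x_min + 1).toNat := by
    simpa [pvScatter_length] using h1
  apply List.ext_getElem?
  intro j
  have hlhs : ((pvScatter x_min y_min the_path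
      (List.replicate (x_max - x_min + 1).toNat
        (List.replicate (y_max - y_min + 1).toNat ' ')))[i]'h1)
      = (pvScatter x_min y_min the_path
      (List.replicate (x_max - x_min + 1).toNat
        (List.replicate (y_max - y_min + 1).toNat ' ')))[i]?.getD [] := by
    rw [List.getElem?_eq_getElem h1]
    rfl
  rw [hlhs, pvScatter_cell]
  have hbase : (List.replicate (x_max - x_min + 1).toNat
      (List.replicate (y_max - y_min + 1).toNat ' '))[i]?.getD []
      = List.replicate (y_max - y_min + 1).toNat ' ' := by
    rw [List.getElem?_eq_getElem (by simpa using hiW)]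
    simp
  rw [hbase]
  have hrhs : ((List.map
      (fun x => List.map (fun y => if (x, y) ∈ the_path then 'O' else ' ')
        (PySem.List.pyRange y_min (y_max + 1) 1))
      (PySem.List.pyRange x_min (x_max + 1) 1))[i]'h2)
      = List.map (fun y => if ((x_min + (i : Int)), y) ∈ the_path then 'O' else ' ')
        (PySem.List.pyRange y_min (y_max + 1) 1) := by
    rw [List.getElem_map]
    rw [PySem.List.getElem_pyRange_one]
  rw [hrhs]
  by_cases hjH : j < (y_max - y_min + 1).toNat
  · have hjY : j < (PySem.List.pyRange y_min (y_max + 1) 1).length := by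
      rw [PySem.List.length_pyRange_one]; omega
    have hr : (List.map (fun y => if ((x_min + (i : Int)), y) ∈ the_path then 'O' else ' ')
        (PySem.List.pyRange y_min (y_max + 1) 1))[j]?
        = some (if ((x_min + (i : Int)), y_min + (j : Int)) ∈ the_path then 'O' else ' ') := by
      rw [List.getElem?_eq_getElem (by rw [List.length_map]; exact hjY)]
      simp only [List.getElem_map, PySem.List.getElem_pyRange_one]
    rw [hr]
    have hany : (the_path.any (fun p => (p.1 - x_min).toNat == i && (p.2 - y_min).toNat == j))
        = decide ((x_min + (i : Int), y_min + (j : Int)) ∈ the_path) := by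
      by_cases hmem : (x_min + (i : Int), y_min + (j : Int)) ∈ the_path
      · simp only [hmem, decide_true]
        rw [List.any_eq_true]
        refine ⟨(x_min + i, y_min + j), hmem, ?_⟩
        simp only [Bool.and_eq_true, beq_iff_eq]
        constructor <;> omega
      · simp only [hmem, decide_false]
        rw [List.any_eq_false]
        intro p hp
        simp only [Bool.and_eq_true, beq_iff_eq, not_and]
        intro hx hy
        have hb := bnd p hp
        have hpe : p = (x_min + (i : Int), y_min + (j : Int)) := by
          have : p.1 = x_min + i ∧ p.2 = y_min + j := by omega
          exact Prod.ext this.1 this.2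
        exact absurd (hpe ▸ hp) hmem
    by_cases hmem : (x_min + (i : Int), y_min + (j : Int)) ∈ the_path
    · rw [if_pos ⟨by rw [hany]; simp [hmem], by simpa using hjH⟩, if_pos hmem]
    · rw [if_neg (by rw [hany]; simp [hmem]), if_neg hmem,
          List.getElem?_eq_getElem (by simpa using hjH)]
      rw [List.getElem_replicate]
  · rw [if_neg (by rintro ⟨-, hc⟩; simp at hc; omega)]
    rw [List.getElem?_eq_none (by simpa using Nat.le_of_not_lt hjH),
        List.getElem?_eq_none (by rw [List.length_map, PySem.List.length_pyRange_one]; omega)]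

-- ===== VERDICT (by name: the statement is the Claim_ definition above) =====
theorem path_to_str_spec : Claim_equal_path_to_str := by
  intro the_path _ hpre
  unfold Spec_path_to_str path_to_str path_to_str_alt
  cases hxm : PySem.List.min? (the_path.map Prod.fst) (fun v => v) with
  | none =>
      exact absurd (by simpa using (PySem.List.min?_eq_none_iff _ _).mp hxm) hpre
  | some x_min =>
  cases hxM : PySem.List.max? (the_path.map Prod.fst) (fun v => v) with
  | none =>
      exact absurd (by simpa using (PySem.List.max?_eq_none_iff _ _).mp hxM) hpre
  | some x_max =>
  cases hym : PySem.List.min? (the_path.map Prod.snd) (fun v => v) with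
  | none =>
      exact absurd (by simpa using (PySem.List.min?_eq_none_iff _ _).mp hym) hpre
  | some y_min =>
  cases hyM : PySem.List.max? (the_path.map Prod.snd) (fun v => v) with
  | none =>
      exact absurd (by simpa using (PySem.List.max?_eq_none_iff _ _).mp hyM) hpre
  | some y_max =>
  simp only
  rw [pvScatter_grid_eq the_path x_min x_max y_min y_max hxm hxM hym hyM, List.map_map]
  rfl
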